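-- pv_equiv track=rewrite | github.com/JYMOH001/Puzzle-Book-Generator | src/smart_book_maker/generators/sudoku.py | get_difficulty_ranges
-- ===== SOURCE A (Python) =====
-- from typing import List, Tuple, Optional, Dict
--
-- def get_difficulty_ranges(total_puzzles: int) -> Dict[str, Tuple[int, int]]:
--     """
--     Calculate difficulty ranges based on total number of puzzles.
--
--     Args:
--         total_puzzles: Total number of puzzles
--
--     Returns:
--         Dictionary mapping difficulty names to (start, end) ranges
--     """
--     # Distribute puzzles across 5 difficulty levels
--     puzzles_per_level = total_puzzles // 5
--     remainder = total_puzzles % 5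
--
--     ranges = {}
--     current = 1
--
--     for i, level in enumerate(["Very Easy", "Easy", "Medium", "Hard", "Expert"]):
--         # Add extra puzzles to later levels if there's a remainder
--         count = puzzles_per_level + (1 if i >= (5 - remainder) else 0)
--         ranges[level] = (current, current + count - 1)
--         current += count
--
--     return ranges
-- ===== SOURCE B (Python) =====
-- def get_difficulty_ranges(total_puzzles: int):
--     """Closed-form per-level ranges: no running accumulator."""
--     ppl, rem = divmod(total_puzzles, 5)
--     t = 5 - rem
--     return {
--         name: (1 + i * ppl + max(0, i - t), (i + 1) * ppl + max(0, i + 1 - t))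
--         for i, name in enumerate(["Very Easy", "Easy", "Medium", "Hard", "Expert"])
--     }
-- ===== Notes on version B (the rewrite author's own statement) =====
-- stated objective: simpler
-- what changed: Replaces the running 'current' accumulator loop with a dict comprehension computing each level's (start, end) from a closed form in the level index.
import Mathlib
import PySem

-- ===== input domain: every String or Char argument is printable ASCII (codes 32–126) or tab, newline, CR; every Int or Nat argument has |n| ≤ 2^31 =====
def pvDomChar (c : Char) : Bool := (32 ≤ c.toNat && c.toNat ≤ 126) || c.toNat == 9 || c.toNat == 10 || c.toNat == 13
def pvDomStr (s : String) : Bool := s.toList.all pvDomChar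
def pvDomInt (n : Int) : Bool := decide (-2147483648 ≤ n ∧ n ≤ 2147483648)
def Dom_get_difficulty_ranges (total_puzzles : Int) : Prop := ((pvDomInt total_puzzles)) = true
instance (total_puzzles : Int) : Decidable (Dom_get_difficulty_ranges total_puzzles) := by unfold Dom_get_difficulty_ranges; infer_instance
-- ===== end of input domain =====

-- B replaces A's running-start accumulator with a closed-form start/end per level (objective: simpler).

-- ===== PORT A =====
def get_difficulty_ranges (total_puzzles : Int) : List (String × Int × Int) :=
  let puzzles_per_level := PySem.Int.floordiv total_puzzles 5
  let remainder := PySem.Int.mod total_puzzles 5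
  let st := (PySem.List.enumerate ["Very Easy", "Easy", "Medium", "Hard", "Expert"]).foldl
    (fun (st : PySem.Dict String (Int × Int) × Int) p =>
      let count := puzzles_per_level + (if p.1 ≥ 5 - remainder then 1 else 0)
      (st.1.insert p.2 (st.2, st.2 + count - 1), st.2 + count))
    (PySem.Dict.empty, 1)
  st.1.items

-- ===== PORT B =====
def get_difficulty_ranges_alt (total_puzzles : Int) : List (String × Int × Int) :=
  let ppl := PySem.Int.floordiv total_puzzles 5
  let rem := PySem.Int.mod total_puzzles 5
  let t := 5 - rem
  (PySem.List.enumerate ["Very Easy", "Easy", "Medium", "Hard", "Expert"]).map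
    (fun p => (p.2, (1 + p.1 * ppl + max 0 (p.1 - t), (p.1 + 1) * ppl + max 0 (p.1 + 1 - t))))

-- ===== PRECONDITION & SPEC =====
def Spec_get_difficulty_ranges (total_puzzles : Int) (out : List (String × Int × Int)) : Prop := out = get_difficulty_ranges_alt total_puzzles
instance (total_puzzles : Int) (out : List (String × Int × Int)) : Decidable (Spec_get_difficulty_ranges total_puzzles out) := by unfold Spec_get_difficulty_ranges; infer_instance

-- ===== CLAIM (what is proved, stated in full; the proofs are below) =====
def Claim_equal_get_difficulty_ranges : Prop := ∀ (total_puzzles : Int), Dom_get_difficulty_ranges total_puzzles → Spec_get_difficulty_ranges total_puzzles (get_difficulty_ranges total_puzzles)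

-- ===== LEMMAS AND PROOFS =====

-- ===== VERDICT (by name: the statement is the Claim_ definition above) =====
theorem get_difficulty_ranges_spec : Claim_equal_get_difficulty_ranges := by
  intro n _
  unfold Spec_get_difficulty_ranges get_difficulty_ranges get_difficulty_ranges_alt
  have h1 : 0 ≤ PySem.Int.mod n 5 := PySem.Int.mod_nonneg (a := n) (b := 5) (by norm_num)
  have h2 : PySem.Int.mod n 5 < 5 := PySem.Int.mod_lt (a := n) (b := 5) (by norm_num)
  simp [PySem.List.enumerate, PySem.Dict.insert, PySem.Dict.empty,
    PySem.Dict.contains, List.foldl, max_def]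
  split_ifs <;> simp_all <;> omega
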